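-- pv_equiv track=rewrite | github.com/meliaph-monitech/260417_Statistical-based-Signal-QC | 260417_SignalQC_V02.py | compute_group_assignments
-- ===== SOURCE A (Python) =====
-- from typing import Dict, List, Tuple, Optional
--
-- def compute_group_assignments(sorted_files: List[str], group_size: int) -> Dict[str, int]:
--     group_assignments = {}
--     if group_size <= 0:
--         group_size = 1
--     for idx, fname in enumerate(sorted_files):
--         group_no = idx // group_size + 1
--         group_assignments[fname] = group_no
--     return group_assignments
-- ===== SOURCE B (Python) =====
-- def compute_group_assignments(sorted_files, group_size):
--     gs = group_size if group_size > 0 else 1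
--     group_assignments = {}
--     for g, start in enumerate(range(0, len(sorted_files), gs)):
--         for fname in sorted_files[start:start + gs]:
--             group_assignments[fname] = g + 1
--     return group_assignments
-- ===== Notes on version B (the rewrite author's own statement) =====
-- stated objective: alternative
-- what changed: Replaces A's single flat pass computing idx//group_size per file with a nested partition-then-assign pass: enumerate chunk start indices range(0, len, gs) and assign group g+1 to every file in the slice sorted_files[start:start+gs], eliminating the per-element division.
import Mathlib
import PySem

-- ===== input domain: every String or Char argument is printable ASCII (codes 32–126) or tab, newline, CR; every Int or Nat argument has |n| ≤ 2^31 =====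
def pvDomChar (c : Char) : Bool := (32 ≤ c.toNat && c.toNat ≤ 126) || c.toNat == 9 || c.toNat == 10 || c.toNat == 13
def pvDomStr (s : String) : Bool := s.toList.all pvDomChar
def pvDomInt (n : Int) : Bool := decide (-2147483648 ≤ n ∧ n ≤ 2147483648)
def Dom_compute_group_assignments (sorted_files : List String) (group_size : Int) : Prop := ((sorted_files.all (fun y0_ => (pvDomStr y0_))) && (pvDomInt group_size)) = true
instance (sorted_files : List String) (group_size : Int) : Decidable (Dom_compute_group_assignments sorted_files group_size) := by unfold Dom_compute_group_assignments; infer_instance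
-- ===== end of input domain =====

-- B replaces the flat index//group_size pass by a partition-then-assign nested pass over chunk
-- start indices (objective: alternative decomposition, same cost).

-- ===== PORT A =====
-- literal port of A: clamp group_size, then one pass over enumerate(sorted_files),
-- dict[fname] = idx // group_size + 1
def compute_group_assignments (sorted_files : List String) (group_size : Int) : List (String × Int) :=
  let gs : Int := if group_size ≤ 0 then 1 else group_size
  ((PySem.List.enumerate sorted_files).foldl
    (fun (d : PySem.Dict String Int) p => d.insert p.2 (PySem.Int.floordiv p.1 gs + 1))
    PySem.Dict.empty).items

-- ===== PORT B =====
-- literal port of Source B: enumerate chunk starts range(0, len, gs), assign g+1 to each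
-- fname in sorted_files[start:start+gs]
def compute_group_assignments_alt (sorted_files : List String) (group_size : Int) : List (String × Int) :=
  let gs : Int := if 0 < group_size then group_size else 1
  ((PySem.List.enumerate (PySem.List.pyRange 0 (sorted_files.length : Int) gs)).foldl
    (fun (d : PySem.Dict String Int) q =>
      (PySem.List.slice sorted_files (some q.2) (some (q.2 + gs))).foldl
        (fun (d2 : PySem.Dict String Int) fname => d2.insert fname (q.1 + 1)) d)
    PySem.Dict.empty).items

-- ===== PRECONDITION & SPEC =====
def Spec_compute_group_assignments (sorted_files : List String) (group_size : Int) (out : List (String × Int)) : Prop := out = compute_group_assignments_alt sorted_files group_size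
instance (sorted_files : List String) (group_size : Int) (out : List (String × Int)) : Decidable (Spec_compute_group_assignments sorted_files group_size out) := by unfold Spec_compute_group_assignments; infer_instance

-- ===== CLAIM (what is proved, stated in full; the proofs are below) =====
def Claim_equal_compute_group_assignments : Prop := ∀ (sorted_files : List String) (group_size : Int), Dom_compute_group_assignments sorted_files group_size → Spec_compute_group_assignments sorted_files group_size (compute_group_assignments sorted_files group_size)

-- ===== LEMMAS AND PROOFS =====

-- floor division with a positive divisor, pinned by its bounds
theorem pv_fdiv_eq {s gs g0 : Int} (hgs : 0 < gs) (h1 : g0 * gs ≤ s) (h2 : s < (g0 + 1) * gs) :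
    PySem.Int.floordiv s gs = g0 := by
  have hd : s.fdiv gs = s / gs := by
    rw [Int.fdiv_eq_ediv]; simp [Int.le_of_lt hgs]
  have hle : g0 ≤ s / gs := (Int.le_ediv_iff_mul_le hgs).mpr h1
  have hlt : s / gs < g0 + 1 := (Int.ediv_lt_iff_lt_mul hgs).mpr h2
  show s.fdiv gs = g0
  omega

theorem pv_enumerate_map_snd {α β : Type} (f : α → β) (l : List α) (s : Int) :
    PySem.List.enumerate (l.map f) s = (PySem.List.enumerate l s).map (fun p => (p.1, f p.2)) := by
  induction l generalizing s with
  | nil => simp [PySem.List.enumerate_nil]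
  | cons x xs ih => simp [PySem.List.enumerate_cons, ih]

-- a whole block of ≤ gs consecutive indices starting within group g0 maps to g0
theorem pv_chunk_map {gs g0 : Int} (hgs : 0 < gs) (l : List String) :
    ∀ s : Int, g0 * gs ≤ s → s + l.length ≤ (g0 + 1) * gs →
    (PySem.List.enumerate l s).map (fun p => (p.2, PySem.Int.floordiv p.1 gs + 1))
      = l.map (fun x => (x, g0 + 1)) := by
  induction l with
  | nil => simp [PySem.List.enumerate_nil]
  | cons x xs ih =>
    intro s h1 h2
    simp only [List.length_cons] at h2
    rw [PySem.List.enumerate_cons]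
    simp only [List.map_cons]
    rw [pv_fdiv_eq hgs h1 (by push_cast at h2 ⊢; omega), ih (s + 1) (by omega) (by push_cast at h2 ⊢; omega)]

-- range(0, n, gs) with n > 0 peels its first chunk start
theorem pv_pyRange_step_cons {n gs : Int} (hgs : 0 < gs) (hn : 0 < n) :
    PySem.List.pyRange 0 n gs = 0 :: (PySem.List.pyRange 0 (n - gs) gs).map (· + gs) := by
  rw [PySem.List.pyRange_of_pos 0 n hgs, PySem.List.pyRange_of_pos 0 (n - gs) hgs]
  have hc : ((n - 0 + gs - 1) / gs).toNat = (if 0 < n - gs then ((n - gs - 0 + gs - 1) / gs).toNat else 0) + 1 := by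
    have h1 : 0 ≤ n + gs - 1 := by omega
    split_ifs with h
    · have ha : n - 0 + gs - 1 = (n - 1) + 1 * gs := by ring
      have hb : n - gs - 0 + gs - 1 = n - 1 := by ring
      rw [ha, hb, Int.add_mul_ediv_right _ _ (by omega : gs ≠ 0)]
      have h3 : 0 ≤ (n - 1) / gs := Int.ediv_nonneg (by omega) (by omega)
      omega
    · -- 0 < n ≤ gs : count is 1
      have hle : n ≤ gs := by omega
      have : (n - 0 + gs - 1) / gs = 1 := by
        have h1 : 1 * gs ≤ n - 0 + gs - 1 := by omega
        have h2 : n - 0 + gs - 1 < (1 + 1) * gs := by omega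
        have hle' : 1 ≤ (n - 0 + gs - 1) / gs := (Int.le_ediv_iff_mul_le hgs).mpr h1
        have hlt' : (n - 0 + gs - 1) / gs < 2 := (Int.ediv_lt_iff_lt_mul hgs).mpr h2
        omega
      rw [this]; rfl
  rw [if_pos (by omega : (0:Int) < n), hc, List.range_succ_eq_map]
  simp only [List.map_cons, List.map_map]
  congr 1
  · norm_num
  · apply List.map_congr_left
    intro k _
    simp only [Function.comp_apply]
    push_cast
    ring

-- shifting a chunk slice down by one chunk
theorem pv_slice_shift {gs q : Int} (hgs : 0 < gs) (hq : 0 ≤ q) (xs : List String) :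
    PySem.List.slice xs (some (q + gs)) (some (q + gs + gs))
      = PySem.List.slice (xs.drop gs.toNat) (some q) (some (q + gs)) := by
  rw [PySem.List.slice_toNat xs (by omega) (by omega),
      PySem.List.slice_toNat _ hq (by omega), List.drop_drop]
  congr 1
  · omega
  · congr 1
    omega

-- the heart of the equivalence: A's flat pass produces exactly B's chunked pass, pair for pair
theorem pv_main (gs : Int) (hgs : 0 < gs) (xs : List String) (g0 : Int) (hg0 : 0 ≤ g0) :
    (PySem.List.enumerate xs (g0 * gs)).map (fun p => (p.2, PySem.Int.floordiv p.1 gs + 1))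
      = ((PySem.List.enumerate (PySem.List.pyRange 0 (xs.length : Int) gs) g0).map
          (fun q => (PySem.List.slice xs (some q.2) (some (q.2 + gs))).map
            (fun x => (x, q.1 + 1)))).flatten := by
  rcases hx : xs with _ | ⟨x, rest⟩
  · rw [PySem.List.pyRange_of_pos _ _ hgs]
    simp [PySem.List.enumerate_nil]
  · have hn : 0 < (((x :: rest).length : Nat) : Int) := by simp
    rw [pv_pyRange_step_cons hgs hn]
    conv_rhs => rw [PySem.List.enumerate_cons, pv_enumerate_map_snd]
    simp only [List.map_cons, List.map_map, List.flatten_cons]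
    -- LHS: split the list into its first chunk and the rest
    conv_lhs => rw [← List.take_append_drop gs.toNat (x :: rest)]
    rw [PySem.List.enumerate_append, List.map_append]
    have htake : ((x :: rest).take gs.toNat).length ≤ gs.toNat := by
      simp
    have hchunk0 :
        (PySem.List.enumerate ((x :: rest).take gs.toNat) (g0 * gs)).map
            (fun p => (p.2, PySem.Int.floordiv p.1 gs + 1))
          = (PySem.List.slice (x :: rest) (some 0) (some (0 + gs))).map (fun x => (x, g0 + 1)) := by
      rw [PySem.List.slice_toNat _ le_rfl (by omega)]
      simp only [List.drop_zero, Int.toNat_zero, Nat.sub_zero, zero_add]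
      refine pv_chunk_map hgs _ _ le_rfl ?_
      have hc : ((List.take gs.toNat (x :: rest)).length : Int) ≤ gs := by
        calc ((List.take gs.toNat (x :: rest)).length : Int) ≤ (gs.toNat : Int) := by
              exact_mod_cast htake
          _ = gs := by omega
      rw [add_mul, one_mul]
      linarith
    by_cases hcase : (x :: rest).length ≤ gs.toNat
    · -- everything fits in the first chunk
      have hd : (x :: rest).drop gs.toNat = [] := List.drop_eq_nil_of_le hcase
      have hr : PySem.List.pyRange 0 (((x :: rest).length : Int) - gs) gs = [] := by
        rw [PySem.List.pyRange_of_pos _ _ hgs,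
            if_neg (by simp only [List.length_cons] at hcase ⊢; omega)]
        simp
      rw [hd, hr]
      simp [PySem.List.enumerate_nil, hchunk0]
    · rw [not_le] at hcase
      have hlen : (((x :: rest).drop gs.toNat).length : Int) = ((x :: rest).length : Int) - gs := by
        rw [List.length_drop]; omega
      have hrec := pv_main gs hgs ((x :: rest).drop gs.toNat) (g0 + 1) (by omega)
      rw [hlen] at hrec
      have hstart : (g0 * gs + (((x :: rest).take gs.toNat).length : Int)) = (g0 + 1) * gs := by
        rw [List.length_take]
        have : min gs.toNat (x :: rest).length = gs.toNat := by omega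
        rw [this]; ring_nf; omega
      rw [hstart, hrec, hchunk0]
      congr 1
      refine congrArg List.flatten (List.map_congr_left ?_)
      intro q hq
      rcases (PySem.List.mem_enumerate_iff _ _ _).mp hq with ⟨k, hk, rfl⟩
      have hmem : (PySem.List.pyRange 0 (((x :: rest).length : Int) - gs) gs)[k] ∈
          PySem.List.pyRange 0 (((x :: rest).length : Int) - gs) gs := List.getElem_mem hk
      have hq2 : 0 ≤ (PySem.List.pyRange 0 (((x :: rest).length : Int) - gs) gs)[k] :=
        ((PySem.List.mem_pyRange_iff_of_pos hgs _).mp hmem).1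
      simp only [Function.comp_apply]
      rw [pv_slice_shift hgs hq2]
termination_by xs.length
decreasing_by
  subst hx
  simp only [List.length_drop]
  omega

-- fold of per-element inserts as a fold of key/value pairs
theorem pv_foldl_insert_pairs {κ ν α : Type} [BEq κ] (l : List α) (k : α → κ) (v : α → ν)
    (d : PySem.Dict κ ν) :
    l.foldl (fun d a => d.insert (k a) (v a)) d
      = (l.map (fun a => (k a, v a))).foldl (fun d q => d.insert q.1 q.2) d := by
  rw [List.foldl_map]

-- a nested fold is a fold over the flattened pair lists
theorem pv_foldl_foldl {α β γ : Type} (L : List α) (P : α → List β) (f : γ → β → γ) (d : γ) :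
    L.foldl (fun d a => (P a).foldl f d) d = ((L.map P).flatten).foldl f d := by
  rw [List.foldl_flatten, List.foldl_map]

-- ===== VERDICT (by name: the statement is the Claim_ definition above) =====
theorem compute_group_assignments_spec : Claim_equal_compute_group_assignments := by
  unfold Claim_equal_compute_group_assignments Spec_compute_group_assignments
  intro xs g _
  simp only [compute_group_assignments, compute_group_assignments_alt]
  have hgseq : (if g ≤ 0 then (1:Int) else g) = (if 0 < g then g else 1) := by
    split_ifs <;> omega
  rw [hgseq]
  set gs := (if 0 < g then g else 1) with hgsdef
  have hgs : 0 < gs := by rw [hgsdef]; split_ifs <;> omega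
  congr 1
  rw [pv_foldl_insert_pairs (PySem.List.enumerate xs) (fun p => p.2)
        (fun p => PySem.Int.floordiv p.1 gs + 1)]
  have hB : ∀ q : Int × Int,
      (fun (d : PySem.Dict String Int) (q : Int × Int) =>
        (PySem.List.slice xs (some q.2) (some (q.2 + gs))).foldl
          (fun d2 fname => d2.insert fname (q.1 + 1)) d)
      = fun d q => (((PySem.List.slice xs (some q.2) (some (q.2 + gs))).map
          (fun x => (x, q.1 + 1)))).foldl (fun d q => d.insert q.1 q.2) d := by
    intro _
    funext d q
    rw [pv_foldl_insert_pairs]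
  rw [hB (0, 0), pv_foldl_foldl]
  congr 1
  have := pv_main gs hgs xs 0 le_rfl
  simpa using this
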